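-- pv_equiv track=rewrite | github.com/SantiQ0905/AdvancedAlgorithms | Triangulation/ClassAct8_Triangulation.py | find_unique_edges
-- ===== SOURCE A (Python) =====
-- def get_edges(triangle):
--     return [
--         (triangle[0], triangle[1]),
--         (triangle[1], triangle[2]),
--         (triangle[2], triangle[0])
--     ]
--
-- def normalize_edge(edge):
--     p1, p2 = edge
--     if p1 < p2:
--         return (p1, p2)
--     else:
--         return (p2, p1)
--
-- def find_unique_edges(triangles):
--     edge_count = {}
--
--     for triangle in triangles:
--         edges = get_edges(triangle)
--         for edge in edges:
--             normalized = normalize_edge(edge)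
--             edge_count[normalized] = edge_count.get(normalized, 0) + 1
--
--     # Return edges that appear exactly once
--     unique_edges = [edge for edge, count in edge_count.items() if count == 1]
--     return unique_edges
-- ===== SOURCE B (Python) =====
-- def find_unique_edges(triangles):
--     # single pass: 'once' keeps edges seen exactly once (in first-seen order),
--     # 'repeated' the edges seen 2+ times
--     once = {}
--     repeated = set()
--     for t in triangles:
--         for a, b in ((t[0], t[1]), (t[1], t[2]), (t[2], t[0])):
--             ne = (a, b) if a < b else (b, a)
--             if ne in repeated:
--                 continue
--             if ne in once:
--                 del once[ne]
--                 repeated.add(ne)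
--             else:
--                 once[ne] = None
--     return list(once)
-- ===== Notes on version B (the rewrite author's own statement) =====
-- stated objective: alternative
-- what changed: Replaces A's two-phase count-every-edge-then-filter (build a full edge->count dict, then a second pass over its items) by a single pass that maintains an ordered dict of edges seen exactly once and a set of edges seen twice or more, returning the surviving keys directly.
import Mathlib
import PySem

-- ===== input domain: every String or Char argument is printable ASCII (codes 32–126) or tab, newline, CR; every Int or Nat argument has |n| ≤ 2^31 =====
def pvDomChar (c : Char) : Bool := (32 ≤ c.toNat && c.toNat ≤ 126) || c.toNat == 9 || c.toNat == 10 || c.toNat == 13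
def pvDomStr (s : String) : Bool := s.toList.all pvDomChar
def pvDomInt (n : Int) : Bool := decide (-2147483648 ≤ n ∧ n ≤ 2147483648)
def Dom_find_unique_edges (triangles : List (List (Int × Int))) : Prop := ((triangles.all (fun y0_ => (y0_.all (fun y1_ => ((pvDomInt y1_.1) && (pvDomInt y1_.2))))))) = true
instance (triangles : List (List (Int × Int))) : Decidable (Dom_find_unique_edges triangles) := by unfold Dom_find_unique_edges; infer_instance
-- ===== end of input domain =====

-- B replaces A's count-then-filter (build a full edge→count dict, then a second pass over its
-- items) by a single pass keeping only an ordered dict of edges seen exactly once and a set of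
-- repeated edges (objective: alternative / constant-factor simpler final step).

-- Python's lexicographic '<' on pairs of ints (Mathlib's Prod '<' is the pointwise order, so spelled out)
def pvPairLt (a b : Int × Int) : Bool := decide (a.1 < b.1) || (a.1 == b.1 && decide (a.2 < b.2))

-- ===== PORT A =====
-- get_edges: triangle[0],[1],[2]; the 'none' branch is unreachable under Pre_ (Python raises IndexError there)
def get_edges (t : List (Int × Int)) : List ((Int × Int) × (Int × Int)) :=
  match PySem.List.pyGet? t 0, PySem.List.pyGet? t 1, PySem.List.pyGet? t 2 with
  | some a, some b, some c => [(a, b), (b, c), (c, a)]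
  | _, _, _ => []

def normalize_edge (e : (Int × Int) × (Int × Int)) : (Int × Int) × (Int × Int) :=
  if pvPairLt e.1 e.2 then (e.1, e.2) else (e.2, e.1)

def find_unique_edges (triangles : List (List (Int × Int))) : List ((Int × Int) × (Int × Int)) :=
  let edge_count : PySem.Dict ((Int × Int) × (Int × Int)) Int :=
    triangles.foldl (fun d triangle =>
      (get_edges triangle).foldl (fun d edge =>
        let normalized := normalize_edge edge
        d.insert normalized (d.getD normalized 0 + 1)) d) ⟨[]⟩
  (edge_count.items.filter (fun p => p.2 == 1)).map Prod.fst

-- ===== PORT B =====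
-- one step of B's loop: skip if repeated; promote once→repeated; else record in once
def pvBStep (st : PySem.Dict ((Int × Int) × (Int × Int)) Unit × PySem.Set ((Int × Int) × (Int × Int)))
    (ne : (Int × Int) × (Int × Int)) :
    PySem.Dict ((Int × Int) × (Int × Int)) Unit × PySem.Set ((Int × Int) × (Int × Int)) :=
  if st.2.contains ne then st
  else if st.1.contains ne then (st.1.erase ne, st.2.add ne)
  else (st.1.insert ne (), st.2)

def find_unique_edges_alt (triangles : List (List (Int × Int))) : List ((Int × Int) × (Int × Int)) :=
  let st := triangles.foldl (fun st t =>
    match PySem.List.pyGet? t 0, PySem.List.pyGet? t 1, PySem.List.pyGet? t 2 with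
    | some a, some b, some c =>
        [(a, b), (b, c), (c, a)].foldl
          (fun st e => pvBStep st (if pvPairLt e.1 e.2 then (e.1, e.2) else (e.2, e.1))) st
    | _, _, _ => st) (⟨[]⟩, ([] : PySem.Set ((Int × Int) × (Int × Int))))
  st.1.items.map Prod.fst

-- ===== PRECONDITION & SPEC =====
-- Pre_ excludes triangles with fewer than 3 points: both Pythons raise IndexError there.
def Pre_find_unique_edges (triangles : List (List (Int × Int))) : Prop :=
  ∀ t ∈ triangles, 3 ≤ t.length
instance (triangles : List (List (Int × Int))) : Decidable (Pre_find_unique_edges triangles) := by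
  unfold Pre_find_unique_edges; infer_instance
def pvWitness_find_unique_edges : (List (List (Int × Int))) :=
  [[(0, 0), (1, 0), (0, 1)], [(1, 0), (0, 1), (1, 1)]]

def Spec_find_unique_edges (triangles : List (List (Int × Int))) (out : List ((Int × Int) × (Int × Int))) : Prop := out = find_unique_edges_alt triangles
instance (triangles : List (List (Int × Int))) (out : List ((Int × Int) × (Int × Int))) : Decidable (Spec_find_unique_edges triangles out) := by unfold Spec_find_unique_edges; infer_instance

-- ===== CLAIM (what is proved, stated in full; the proofs are below) =====
def Claim_equal_find_unique_edges : Prop := ∀ (triangles : List (List (Int × Int))), Dom_find_unique_edges triangles → Pre_find_unique_edges triangles → Spec_find_unique_edges triangles (find_unique_edges triangles)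

-- ===== LEMMAS AND PROOFS =====
-- abbreviations used only by the proofs
def pvAStep (d : PySem.Dict ((Int × Int) × (Int × Int)) Int) (n : (Int × Int) × (Int × Int)) :
    PySem.Dict ((Int × Int) × (Int × Int)) Int :=
  d.insert n (d.getD n 0 + 1)

-- invariant tying A's counter to B's (once, repeated) state
def pvInv (d : PySem.Dict ((Int × Int) × (Int × Int)) Int)
    (once : PySem.Dict ((Int × Int) × (Int × Int)) Unit)
    (rep : PySem.Set ((Int × Int) × (Int × Int))) : Prop :=
  (d.items.map Prod.fst).Nodup ∧
  (∀ p ∈ d.items, 1 ≤ p.2) ∧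
  once.items = (d.items.filter (fun p => p.2 == 1)).map (fun p => (p.1, ())) ∧
  (∀ k, rep.contains k = true ↔ ∃ p ∈ d.items, p.1 = k ∧ 2 ≤ p.2)

theorem pvInv_step (d : PySem.Dict ((Int × Int) × (Int × Int)) Int)
    (once : PySem.Dict ((Int × Int) × (Int × Int)) Unit)
    (rep : PySem.Set ((Int × Int) × (Int × Int)))
    (n : (Int × Int) × (Int × Int)) (h : pvInv d once rep) :
    pvInv (pvAStep d n) (pvBStep (once, rep) n).1 (pvBStep (once, rep) n).2 := by
  obtain ⟨hnd, hpos, honce, hrep⟩ := h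
  by_cases hc : d.contains n = true
  · -- there is a (unique) entry with key n
    have hx : ∃ q ∈ d.items, q.1 = n := by
      simpa [PySem.Dict.contains, List.any_eq_true] using hc
    obtain ⟨⟨k0, v⟩, hq, hk0⟩ := hx
    simp only at hk0
    subst hk0
    have huniq : ∀ p ∈ d.items, p.1 = k0 → p = (k0, v) := by
      intro p hp hpk
      exact List.inj_on_of_nodup_map hnd hp hq (by simpa using hpk)
    have hfind : d.items.find? (fun p => p.1 == k0) = some (k0, v) := by
      have hs : (d.items.find? (fun p => p.1 == k0)).isSome := by
        rw [List.find?_isSome]; exact ⟨(k0, v), hq, by simp⟩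
      obtain ⟨r, hr⟩ := Option.isSome_iff_exists.mp hs
      have hrp : r.1 = k0 := by simpa using List.find?_some hr
      have hrm : r ∈ d.items := List.mem_of_find?_eq_some hr
      rw [hr, huniq r hrm hrp]
    have hgetD : d.getD k0 0 = v := by
      simp [PySem.Dict.getD, PySem.Dict.get?, hfind]
    have hA : pvAStep d k0 =
        ⟨d.items.map (fun p => if p.1 == k0 then (k0, v + 1) else p)⟩ := by
      simp [pvAStep, PySem.Dict.insert, hc, hgetD]
    have hv1 : 1 ≤ v := hpos _ hq
    have hkeys : (d.items.map (fun p => if p.1 == k0 then (k0, v + 1) else p)).map Prod.fst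
        = d.items.map Prod.fst := by
      rw [List.map_map]; apply List.map_congr_left
      intro p hp
      by_cases hpk : p.1 = k0 <;> simp [hpk]
    by_cases h2 : 2 ≤ v
    · -- already repeated: B does nothing
      have hrepn : rep.contains k0 = true := (hrep _).mpr ⟨(k0, v), hq, rfl, h2⟩
      have hrepm : k0 ∈ rep := by simpa [List.contains_eq_mem] using hrepn
      have hB : pvBStep (once, rep) k0 = (once, rep) := by
        simp [pvBStep, hrepm]
      rw [hA, hB]
      refine ⟨?_, ?_, ?_, ?_⟩
      · simp only [PySem.Dict.items]; rw [hkeys]; exact hnd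
      · intro p hp
        obtain ⟨q', hq', rfl⟩ := List.mem_map.mp hp
        by_cases hqk : q'.1 = k0
        · simp only [hqk, beq_self_eq_true, if_true]; omega
        · simpa [hqk] using hpos _ hq'
      · rw [honce]
        simp only [PySem.Dict.items, List.filter_map, List.map_map]
        rw [List.filter_congr (l := d.items)
            (p := fun a => ((fun p => p.2 == 1) ∘ fun p => if (p.1 == k0) = true then (k0, v + 1) else p) a)
            (q := fun p => p.2 == 1)
            (by intro p hp
                by_cases hpk : p.1 = k0
                · have hpe := huniq p hp hpk; subst hpe
                  simp only [Function.comp_apply, beq_self_eq_true, if_true]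
                  rw [show ((v + 1 : Int) == 1) = false from by simp [beq_iff_eq]; omega,
                      show ((v : Int) == 1) = false from by simp [beq_iff_eq]; omega]
                · simp [hpk])]
        apply List.map_congr_left
        intro p hp
        have hp1 := List.of_mem_filter hp
        have hpm := List.mem_of_mem_filter hp
        by_cases hpk : p.1 = k0
        · exfalso
          have hpe := huniq p hpm hpk; subst hpe
          simp only [beq_iff_eq, decide_eq_true_eq] at hp1; omega
        · simp [hpk]
      · intro k
        rw [hrep k]
        constructor
        · rintro ⟨p, hp, rfl, h2p⟩
          by_cases hpk : p.1 = k0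
          · have hpe := huniq p hp hpk; subst hpe
            exact ⟨(k0, v + 1), List.mem_map.mpr ⟨(k0, v), hq, by simp⟩, rfl, by omega⟩
          · exact ⟨p, List.mem_map.mpr ⟨p, hp, by simp [hpk]⟩, rfl, h2p⟩
        · rintro ⟨p, hp, rfl, h2p⟩
          obtain ⟨q', hq', rfl⟩ := List.mem_map.mp hp
          by_cases hqk : q'.1 = k0
          · refine ⟨(k0, v), hq, ?_, h2⟩
            simp [hqk]
          · refine ⟨q', hq', by simp [hqk], by simpa [hqk] using h2p⟩
    · -- v = 1: B promotes once → repeated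
      have hv : v = 1 := by omega
      subst hv
      have hrepm : k0 ∉ rep := by
        intro hm
        have hcn : rep.contains k0 = true := by simpa [List.contains_eq_mem] using hm
        obtain ⟨p, hp, hk, h2p⟩ := (hrep _).mp hcn
        have hpe := huniq p hp hk; subst hpe; omega
      have honcen : once.contains k0 = true := by
        unfold PySem.Dict.contains
        rw [honce, List.any_eq_true]
        refine ⟨(k0, ()), List.mem_map.mpr ⟨(k0, 1), List.mem_filter.mpr ⟨hq, by simp⟩, rfl⟩, by simp⟩
      have hB : pvBStep (once, rep) k0 = (once.erase k0, rep ++ [k0]) := by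
        simp [pvBStep, hrepm, honcen, PySem.Set.add, List.contains_eq_mem]
      rw [hA, hB]
      refine ⟨?_, ?_, ?_, ?_⟩
      · simp only [PySem.Dict.items]; rw [hkeys]; exact hnd
      · intro p hp
        obtain ⟨q', hq', rfl⟩ := List.mem_map.mp hp
        by_cases hqk : q'.1 = k0
        · simp only [hqk, beq_self_eq_true, if_true]; omega
        · simpa [hqk] using hpos _ hq'
      · -- once side: erase k0 from once  =  survivors of the overwritten counter
        simp only [PySem.Dict.erase, PySem.Dict.items]
        rw [honce]
        simp only [List.filter_map, List.map_map, List.filter_filter]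
        rw [List.filter_congr (l := d.items)
            (q := fun p => (p.2 == 1) && !(p.1 == k0))
            (by intro p hp
                by_cases hpk : p.1 = k0
                · have hpe := huniq p hp hpk; subst hpe; simp
                · simp [hpk, Bool.and_comm])]
        rw [List.filter_congr (l := d.items)
            (p := fun a => ((fun p => p.2 == 1) ∘ fun p => if (p.1 == k0) = true then (k0, 1 + 1) else p) a)
            (q := fun p => (p.2 == 1) && !(p.1 == k0))
            (by intro p hp
                by_cases hpk : p.1 = k0
                · have hpe := huniq p hp hpk; subst hpe; simp
                · simp [hpk])]
        apply List.map_congr_left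
        intro p hp
        have hp1 := List.of_mem_filter hp
        by_cases hpk : p.1 = k0
        · exfalso; simp [hpk] at hp1
        · simp [hpk]
      · intro k
        have hcontains : (rep ++ [k0]).contains k = (rep.contains k || decide (k = k0)) := by
          simp [List.contains_append, List.contains_eq_mem, beq_iff_eq]
        rw [hcontains]
        constructor
        · intro hck
          rcases Bool.or_eq_true_iff.mp hck with hck | hck
          · obtain ⟨p, hp, rfl, h2p⟩ := (hrep _).mp hck
            by_cases hpk : p.1 = k0
            · have hpe := huniq p hp hpk; subst hpe; omega
            · exact ⟨p, List.mem_map.mpr ⟨p, hp, by simp [hpk]⟩, rfl, h2p⟩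
          · have hk : k = k0 := by simpa using hck
            exact ⟨(k0, 2), List.mem_map.mpr ⟨(k0, 1), hq, by simp⟩, hk.symm, by omega⟩
        · rintro ⟨p, hp, rfl, h2p⟩
          obtain ⟨q', hq', rfl⟩ := List.mem_map.mp hp
          by_cases hqk : q'.1 = k0
          · simp [hqk]
          · exact Bool.or_eq_true_iff.mpr (Or.inl ((hrep _).mpr
              ⟨q', hq', by simp [hqk], by simpa [hqk] using h2p⟩))
  · -- no entry with key n: B records it in `once`
    have hcf : d.contains n = false := by simpa using hc
    have hno : ∀ p ∈ d.items, ¬ p.1 = n := by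
      simpa [PySem.Dict.contains, List.any_eq_false] using hcf
    have hfind : d.items.find? (fun p => p.1 == n) = none := by
      rw [List.find?_eq_none]; intro p hp; simpa using hno p hp
    have hrepn : rep.contains n = false := by
      rw [Bool.eq_false_iff]; intro hcn
      obtain ⟨p, hp, hk, _⟩ := (hrep n).mp hcn
      exact hno p hp hk
    have honcen : once.contains n = false := by
      rw [Bool.eq_false_iff]; intro hcn
      unfold PySem.Dict.contains at hcn
      rw [honce, List.any_eq_true] at hcn
      obtain ⟨p, hp, hpk⟩ := hcn
      obtain ⟨q', hq', rfl⟩ := List.mem_map.mp hp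
      exact hno q' (List.mem_of_mem_filter hq') (by simpa using hpk)
    have hrepm : n ∉ rep := by simpa [List.contains_eq_mem] using hrepn
    have hB : pvBStep (once, rep) n = (⟨once.items ++ [(n, ())]⟩, rep) := by
      simp [pvBStep, hrepm, honcen, PySem.Dict.insert]
    have hA : pvAStep d n = ⟨d.items ++ [(n, 1)]⟩ := by
      simp [pvAStep, PySem.Dict.insert, hcf, PySem.Dict.getD, PySem.Dict.get?, hfind]
    rw [hA, hB]
    refine ⟨?_, ?_, ?_, ?_⟩
    · simp only [PySem.Dict.items, List.map_append, List.map_cons, List.map_nil]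
      refine List.Nodup.append hnd (List.nodup_singleton _) ?_
      intro a ha hb
      rw [List.mem_singleton] at hb
      subst hb
      obtain ⟨p, hp, hpn⟩ := List.mem_map.mp ha
      exact hno p hp hpn
    · intro p hp
      rcases List.mem_append.mp hp with hp | hp
      · exact hpos p hp
      · have hpe : p = (n, 1) := by simpa using hp
        subst hpe; norm_num
    · simp [List.filter_append, honce]
    · intro k
      rw [hrep k]
      constructor
      · rintro ⟨p, hp, hk, h2p⟩
        exact ⟨p, List.mem_append_left _ hp, hk, h2p⟩
      · rintro ⟨p, hp, hk, h2p⟩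
        rcases List.mem_append.mp hp with hp | hp
        · exact ⟨p, hp, hk, h2p⟩
        · have hpe : p = (n, 1) := by simpa using hp
          subst hpe; exact absurd h2p (by norm_num)

theorem pvInv_fold (es : List ((Int × Int) × (Int × Int)))
    (d : PySem.Dict ((Int × Int) × (Int × Int)) Int)
    (once : PySem.Dict ((Int × Int) × (Int × Int)) Unit)
    (rep : PySem.Set ((Int × Int) × (Int × Int))) (h : pvInv d once rep) :
    pvInv (es.foldl pvAStep d) (es.foldl pvBStep (once, rep)).1 (es.foldl pvBStep (once, rep)).2 := by
  induction es generalizing d once rep with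
  | nil => exact h
  | cons n es ih =>
      simp only [List.foldl_cons]
      have := pvInv_step d once rep n h
      have heq : pvBStep (once, rep) n = ((pvBStep (once, rep) n).1, (pvBStep (once, rep) n).2) := rfl
      rw [heq]
      exact ih _ _ _ this

-- fold of a nested loop = fold over the flattened list
theorem pvFoldl_flatMap {α β σ : Type} (f : α → List β) (g : σ → β → σ) (ts : List α) (s : σ) :
    ts.foldl (fun s t => (f t).foldl g s) s = (ts.flatMap f).foldl g s := by
  induction ts generalizing s with
  | nil => rfl
  | cons t ts ih => simp only [List.foldl_cons, List.flatMap_cons, List.foldl_append, ih]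

theorem pvA_eq (tr : List (List (Int × Int))) :
    find_unique_edges tr =
      (((tr.flatMap (fun t => (get_edges t).map normalize_edge)).foldl pvAStep ⟨[]⟩).items.filter
        (fun p => p.2 == 1)).map Prod.fst := by
  unfold find_unique_edges
  rw [← pvFoldl_flatMap]
  simp only [List.foldl_map]
  rfl

theorem pvB_eq (tr : List (List (Int × Int))) :
    find_unique_edges_alt tr =
      ((tr.flatMap (fun t => (get_edges t).map normalize_edge)).foldl pvBStep
        (⟨[]⟩, ([] : PySem.Set ((Int × Int) × (Int × Int))))).1.items.map Prod.fst := by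
  unfold find_unique_edges_alt
  rw [← pvFoldl_flatMap]
  have hbody : (fun (st : PySem.Dict ((Int × Int) × (Int × Int)) Unit ×
        PySem.Set ((Int × Int) × (Int × Int))) (t : List (Int × Int)) =>
      match PySem.List.pyGet? t 0, PySem.List.pyGet? t 1, PySem.List.pyGet? t 2 with
      | some a, some b, some c =>
          [(a, b), (b, c), (c, a)].foldl
            (fun st e => pvBStep st (if pvPairLt e.1 e.2 then (e.1, e.2) else (e.2, e.1))) st
      | _, _, _ => st) =
      fun st t => ((get_edges t).map normalize_edge).foldl pvBStep st := by
    funext st t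
    unfold get_edges
    cases h0 : PySem.List.pyGet? t 0 <;> cases h1 : PySem.List.pyGet? t 1 <;>
      cases h2 : PySem.List.pyGet? t 2 <;>
      simp only [List.map_nil, List.foldl_nil, List.map_cons, List.foldl_cons, List.foldl_map,
        normalize_edge]
  rw [hbody]

theorem pvInv_init : pvInv ⟨[]⟩ ⟨[]⟩ ([] : PySem.Set ((Int × Int) × (Int × Int))) := by
  refine ⟨by simp, by simp, by simp, ?_⟩
  intro k; simp

-- ===== VERDICT (by name: the statement is the Claim_ definition above) =====
theorem find_unique_edges_spec : Claim_equal_find_unique_edges := by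
  intro triangles _ _
  unfold Spec_find_unique_edges
  rw [pvA_eq, pvB_eq]
  obtain ⟨-, -, h3, -⟩ :=
    pvInv_fold (triangles.flatMap (fun t => (get_edges t).map normalize_edge)) ⟨[]⟩ ⟨[]⟩ [] pvInv_init
  rw [h3, List.map_map]
  rfl
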